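-- pv_equiv track=rewrite | github.com/G0LDF0X/Python-Coding-Test-Study | jeongyun/PG_124나라.py | solution
-- ===== SOURCE A (Python) =====
-- def solution(n):
--     answer = ''
--     # 3진수처럼 계산
--     while n >0:
--         # 3으로 나눴을때 나머지가 1이면 1
--         if n % 3 == 1:
--             answer+='1'
--             n //=3
--         # 3으로 나눴을 때 나머지가 2이면 2
--         elif n % 3 == 2:
--             answer += '2'
--             n //=3
--         # 3으로 나눴을 때 나머지가 0이면 4, 몫 -1
--         else:
--             n //= 3
--             n -=1
--             answer += '4'
--
--     # 뒤에서 부터 적어야하므로 reverse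
--     return ''.join(reversed(answer))
-- ===== SOURCE B (Python) =====
-- def solution(n):
--     if n <= 0:
--         return ''
--     q, r = divmod(n, 3)
--     if r == 0:
--         return solution(q - 1) + '4'
--     return solution(q) + str(r)
-- ===== Notes on version B (the rewrite author's own statement) =====
-- stated objective: simpler
-- what changed: Replaces A's while-loop that appends digits least-significant-first and reverses the accumulated string at the end with a direct recursion on the quotient that builds the string most-significant-first, needing no accumulator and no reverse.
import Mathlib
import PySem

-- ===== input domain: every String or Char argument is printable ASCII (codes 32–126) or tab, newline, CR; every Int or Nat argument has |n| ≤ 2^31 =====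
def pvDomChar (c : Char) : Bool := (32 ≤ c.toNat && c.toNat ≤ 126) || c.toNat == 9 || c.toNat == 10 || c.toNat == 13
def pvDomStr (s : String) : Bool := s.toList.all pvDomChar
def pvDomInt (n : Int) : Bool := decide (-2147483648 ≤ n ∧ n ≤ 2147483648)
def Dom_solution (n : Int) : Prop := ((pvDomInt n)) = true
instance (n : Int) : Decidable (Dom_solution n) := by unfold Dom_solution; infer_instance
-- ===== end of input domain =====

-- ===== PORT A =====
-- A's while-loop: digits appended least-significant first, reversed at the end.
-- 'fuel' only makes the loop total; it is n.toNat, enough since n's toNat strictly drops each pass.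
def solutionLoop (fuel : Nat) (n : Int) (answer : List Char) : List Char :=
  match fuel with
  | 0 => answer
  | fuel + 1 =>
    if n > 0 then
      if PySem.Int.mod n 3 = 1 then
        solutionLoop fuel (PySem.Int.floordiv n 3) (answer ++ ['1'])
      else if PySem.Int.mod n 3 = 2 then
        solutionLoop fuel (PySem.Int.floordiv n 3) (answer ++ ['2'])
      else
        solutionLoop fuel (PySem.Int.floordiv n 3 - 1) (answer ++ ['4'])
    else answer

def solution (n : Int) : String := String.ofList (solutionLoop n.toNat n []).reverse

-- ===== PORT B =====
-- B: recursion on the quotient, building the string most-significant first; same fuel device.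
def solutionAltRec (fuel : Nat) (n : Int) : String :=
  match fuel with
  | 0 => ""
  | fuel + 1 =>
    if n ≤ 0 then ""
    else
      let q := PySem.Int.floordiv n 3
      let r := PySem.Int.mod n 3
      if r = 0 then solutionAltRec fuel (q - 1) ++ "4"
      else solutionAltRec fuel q ++ PySem.Int.toStr r

def solution_alt (n : Int) : String := solutionAltRec n.toNat n

-- ===== PRECONDITION & SPEC =====
def Spec_solution (n : Int) (out : String) : Prop := out = solution_alt n
instance (n : Int) (out : String) : Decidable (Spec_solution n out) := by unfold Spec_solution; infer_instance

-- ===== CLAIM (what is proved, stated in full; the proofs are below) =====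
def Claim_equal_solution : Prop := ∀ (n : Int), Dom_solution n → Spec_solution n (solution n)

-- ===== LEMMAS AND PROOFS =====
-- the A-loop's reversed output is B's string followed by the reversed accumulator
lemma loop_eq (k : Nat) : ∀ (n : Int), n.toNat ≤ k → ∀ (answer : List Char),
    (solutionLoop k n answer).reverse = (solutionAltRec k n).toList ++ answer.reverse := by
  induction k with
  | zero =>
    intro n hn answer
    rw [solutionLoop, solutionAltRec]
    simp
  | succ k ih =>
    intro n hn answer
    rw [solutionLoop, solutionAltRec]
    by_cases hp : n > 0
    · have hq := PySem.Int.floordiv_eq_ediv_of_pos (a := n) (b := 3) (by omega : (0:Int) < 3)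
      have hr : PySem.Int.mod n 3 = n % 3 := PySem.Int.mod_eq_emod_of_pos (by omega)
      have hmod : n % 3 = 0 ∨ n % 3 = 1 ∨ n % 3 = 2 := by omega
      simp only [hp, if_true, show ¬ n ≤ 0 by omega, if_false]
      rcases hmod with h0 | h1 | h2
      · rw [if_neg (by omega : ¬ PySem.Int.mod n 3 = 1),
            if_neg (by omega : ¬ PySem.Int.mod n 3 = 2),
            if_pos (by omega : PySem.Int.mod n 3 = 0)]
        rw [ih _ (by omega) _]
        simp
      · rw [if_pos (by omega : PySem.Int.mod n 3 = 1),
            if_neg (by omega : ¬ PySem.Int.mod n 3 = 0)]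
        rw [ih _ (by omega) _]
        have h1' : PySem.Int.toStr (PySem.Int.mod n 3) = "1" := by rw [hr, h1]; decide
        simp only [h1']
        simp
      · rw [if_neg (by omega : ¬ PySem.Int.mod n 3 = 1),
            if_pos (by omega : PySem.Int.mod n 3 = 2),
            if_neg (by omega : ¬ PySem.Int.mod n 3 = 0)]
        rw [ih _ (by omega) _]
        have h2' : PySem.Int.toStr (PySem.Int.mod n 3) = "2" := by rw [hr, h2]; decide
        simp only [h2']
        simp
    · simp [hp, show n ≤ 0 by omega]

-- ===== VERDICT (by name: the statement is the Claim_ definition above) =====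
theorem solution_spec : Claim_equal_solution := by
  intro n _
  unfold Spec_solution solution solution_alt
  have h := loop_eq n.toNat n (le_refl _) []
  simp at h
  rw [h]
  exact String.ofList_toList
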